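-- pv_equiv track=rewrite | github.com/obinexusmk2/pyics | pyics/src/pyics/core/transformations/event_transforms.py | _unfold_lines
-- ===== SOURCE A (Python) =====
-- from typing import Callable, Dict, List, Optional, Tuple
--
-- def _unfold_lines(raw: str) -> List[str]:
--     """Un-fold RFC 5545 content lines (join continuation lines)."""
--     lines: List[str] = []
--     for raw_line in raw.splitlines():
--         if raw_line and raw_line[0] in (" ", "\t"):
--             if lines:
--                 lines[-1] += raw_line[1:]
--         else:
--             lines.append(raw_line)
--     return lines
-- ===== SOURCE B (Python) =====
-- def _unfold_lines(raw: str):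
--     """Un-fold RFC 5545 content lines (join continuation lines)."""
--     lines = raw.splitlines()
--     n = len(lines)
--     i = 0
--     # skip leading continuation lines (nothing to attach them to)
--     while i < n and lines[i] and lines[i][0] in (" ", "\t"):
--         i += 1
--     out = []
--     while i < n:
--         parts = [lines[i]]
--         i += 1
--         while i < n and lines[i] and lines[i][0] in (" ", "\t"):
--             parts.append(lines[i][1:])
--             i += 1
--         out.append("".join(parts))
--     return out
-- ===== Notes on version B (the rewrite author's own statement) =====
-- stated objective: alternative
-- what changed: Instead of A's single fold that mutates lines[-1] in place for each continuation line, B skips leading continuation lines, then repeatedly groups each logical line with its run of continuation parts and joins each group once.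
import Mathlib
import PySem

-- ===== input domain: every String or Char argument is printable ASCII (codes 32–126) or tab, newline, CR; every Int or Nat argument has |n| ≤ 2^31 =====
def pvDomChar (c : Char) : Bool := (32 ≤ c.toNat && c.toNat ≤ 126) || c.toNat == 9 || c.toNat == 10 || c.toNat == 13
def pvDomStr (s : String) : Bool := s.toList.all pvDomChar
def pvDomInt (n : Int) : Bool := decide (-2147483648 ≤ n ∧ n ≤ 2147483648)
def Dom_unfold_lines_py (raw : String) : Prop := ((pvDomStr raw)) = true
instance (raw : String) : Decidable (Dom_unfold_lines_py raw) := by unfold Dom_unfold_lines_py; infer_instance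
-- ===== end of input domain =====

-- B replaces A's "mutate lines[-1] in place" fold with a grouping decomposition (skip leading
-- continuations, then collect each logical line's parts and join once); objective: alternative.

-- the test `raw_line and raw_line[0] in (" ", "\t")`, shared verbatim by both Pythons
def pvIsCont (s : String) : Bool :=
  decide (s ≠ "") && (PySem.Str.pyGet? s 0 == some ' ' || PySem.Str.pyGet? s 0 == some '\t')

-- ===== PORT A =====
-- the body of A's for-loop
def pvStepA (lines : List String) (raw_line : String) : List String :=
  if pvIsCont raw_line then
    if lines ≠ [] then lines.dropLast ++ [lines.getLast! ++ PySem.Str.slice raw_line (some 1) none]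
    else lines
  else lines ++ [raw_line]

def unfold_lines_py (raw : String) : List String :=
  (PySem.Str.splitlines raw).foldl pvStepA []

-- ===== PORT B =====
-- B's skip-leading-continuations while loop
def pvSkip : List String → List String
  | [] => []
  | s :: rest => if pvIsCont s then pvSkip rest else s :: rest

-- B's inner while loop: the continuation parts at the front, and the remaining lines
def pvTakeCont : List String → List String × List String
  | [] => ([], [])
  | s :: rest =>
    if pvIsCont s then
      let pr := pvTakeCont rest
      (PySem.Str.slice s (some 1) none :: pr.1, pr.2)
    else ([], s :: rest)

theorem pvTakeCont_snd_le : ∀ (L : List String), (pvTakeCont L).2.length ≤ L.length := by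
  intro L
  induction L with
  | nil => simp [pvTakeCont]
  | cons s rest ih =>
    by_cases h : pvIsCont s = true <;> simp [pvTakeCont, h]
    omega

-- B's outer while loop
def pvGroups : List String → List String
  | [] => []
  | s :: rest => PySem.Str.join "" (s :: (pvTakeCont rest).1) :: pvGroups (pvTakeCont rest).2
termination_by L => L.length
decreasing_by
  have := pvTakeCont_snd_le rest
  simp; omega

def unfold_lines_py_alt (raw : String) : List String :=
  pvGroups (pvSkip (PySem.Str.splitlines raw))

-- ===== PRECONDITION & SPEC =====
def Spec_unfold_lines_py (raw : String) (out : List String) : Prop := out = unfold_lines_py_alt raw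
instance (raw : String) (out : List String) : Decidable (Spec_unfold_lines_py raw out) := by unfold Spec_unfold_lines_py; infer_instance

-- ===== CLAIM (what is proved, stated in full; the proofs are below) =====
def Claim_equal_unfold_lines_py : Prop := ∀ (raw : String), Dom_unfold_lines_py raw → Spec_unfold_lines_py raw (unfold_lines_py raw)

-- ===== LEMMAS AND PROOFS =====

-- A's state after the first non-continuation line: cur is the open last line, done the closed ones
def pvAux (cur : String) : List String → List String
  | [] => [cur]
  | s :: rest =>
    if pvIsCont s then pvAux (cur ++ PySem.Str.slice s (some 1) none) rest
    else cur :: pvAux s rest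

theorem pv_join_cons (s : String) (ps : List String) :
    PySem.Str.join "" (s :: ps) = s ++ PySem.Str.join "" ps := by
  apply String.toList_inj.mp
  simp [PySem.Str.toList_join]
  cases ps <;> simp [PySem.Chars.join, List.intercalate]

theorem pv_foldl_aux : ∀ (L done : List String) (cur : String),
    L.foldl pvStepA (done ++ [cur]) = done ++ pvAux cur L := by
  intro L
  induction L with
  | nil => intro done cur; rfl
  | cons s rest ih =>
    intro done cur
    by_cases h : pvIsCont s = true
    · have hstep : pvStepA (done ++ [cur]) s
          = done ++ [cur ++ PySem.Str.slice s (some 1) none] := by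
        simp [pvStepA, h]
      simp only [List.foldl_cons, hstep, pvAux, h, if_pos]
      exact ih done _
    · have hstep : pvStepA (done ++ [cur]) s = (done ++ [cur]) ++ [s] := by
        simp [pvStepA, h]
      simp only [List.foldl_cons, hstep, pvAux, h, if_neg, Bool.not_eq_true]
      rw [ih (done ++ [cur]) s, List.append_assoc]
      rfl

theorem pv_join_nil : PySem.Str.join "" ([] : List String) = "" := by
  apply String.toList_inj.mp
  simp [PySem.Str.toList_join, PySem.Chars.join, List.intercalate]

theorem pv_aux_groups : ∀ (L : List String) (cur : String),
    pvAux cur L = (cur ++ PySem.Str.join "" (pvTakeCont L).1) :: pvGroups (pvTakeCont L).2 := by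
  intro L
  induction L with
  | nil =>
    intro cur
    simp only [pvAux, pvTakeCont, pv_join_nil, String.append_empty]
    simp [pvGroups]
  | cons s rest ih =>
    intro cur
    by_cases h : pvIsCont s = true
    · simp only [pvAux, h, if_pos, pvTakeCont, ih]
      rw [pv_join_cons, ← String.append_assoc]
    · simp only [pvAux, h, if_neg, Bool.not_eq_true, pvTakeCont]
      rw [pvGroups, pv_join_cons, ← ih s, pv_join_nil, String.append_empty]

theorem pv_main : ∀ (L : List String), L.foldl pvStepA [] = pvGroups (pvSkip L) := by
  intro L
  induction L with
  | nil => simp [pvSkip, pvGroups]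
  | cons s rest ih =>
    by_cases h : pvIsCont s = true
    · have hstep : pvStepA [] s = [] := by simp [pvStepA, h]
      simp only [List.foldl_cons, hstep, pvSkip, h, if_pos]
      exact ih
    · have hstep : pvStepA [] s = [s] := by simp [pvStepA, h]
      simp only [List.foldl_cons, hstep, pvSkip, h, if_neg, Bool.not_eq_true]
      have := pv_foldl_aux rest [] s
      simp only [List.nil_append] at this
      rw [this, pv_aux_groups rest s, pvGroups, pv_join_cons]

-- ===== VERDICT (by name: the statement is the Claim_ definition above) =====
theorem unfold_lines_py_spec : Claim_equal_unfold_lines_py := by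
  intro raw _
  unfold Spec_unfold_lines_py unfold_lines_py unfold_lines_py_alt
  exact pv_main _
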